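-- pv_equiv track=rewrite | github.com/Shawnleeeeee/phoenix-market-learning-sprint | phoenix_research_diagnostics.py | longest_losing_streak
-- ===== SOURCE A (Python) =====
-- from typing import Any, Callable, Iterable
--
-- def longest_losing_streak(values: Iterable[float]) -> int:
--     longest = 0
--     current = 0
--     for value in values:
--         if value < 0:
--             current += 1
--             longest = max(longest, current)
--         else:
--             current = 0
--     return longest
-- ===== SOURCE B (Python) =====
-- def longest_losing_streak(values):
--     vals = list(values)
--     n = len(vals)
--     best = 0
--     i = 0
--     while i < n:
--         if vals[i] < 0:
--             j = i
--             while j < n and vals[j] < 0: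
--                 j += 1
--             best = max(best, j - i)
--             i = j
--         else:
--             i += 1
--     return best
-- ===== Notes on version B (the rewrite author's own statement) =====
-- stated objective: alternative
-- what changed: Instead of threading a running current/longest counter through every element, B scans for maximal negative runs (a two-pointer run scan) and maximises over run lengths.
import Mathlib
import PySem

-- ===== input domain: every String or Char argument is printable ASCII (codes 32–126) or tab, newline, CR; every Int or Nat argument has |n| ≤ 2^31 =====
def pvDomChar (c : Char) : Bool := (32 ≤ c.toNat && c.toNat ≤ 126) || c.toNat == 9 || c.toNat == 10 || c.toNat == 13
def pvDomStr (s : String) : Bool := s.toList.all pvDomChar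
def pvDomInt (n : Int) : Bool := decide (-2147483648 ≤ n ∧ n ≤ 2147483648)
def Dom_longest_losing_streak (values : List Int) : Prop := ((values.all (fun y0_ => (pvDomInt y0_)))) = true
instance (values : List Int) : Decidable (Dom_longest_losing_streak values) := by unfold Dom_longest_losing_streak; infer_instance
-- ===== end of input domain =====

-- B replaces A's running current/longest counters by a scan over maximal negative runs, maximising their lengths (alternative decomposition, same cost).


-- ===== PORT A =====
def longest_losing_streak (values : List Int) : Int :=
  (values.foldl (fun (s : Int × Int) v =>
      if v < 0 then (max s.1 (s.2 + 1), s.2 + 1) else (s.1, 0)) (0, 0)).1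

-- ===== PORT B =====
-- B: scan maximal negative runs and maximise over their lengths (run-scan decomposition)
def llsAltGo (vs : List Int) (best : Int) : Int :=
  match vs with
  | [] => best
  | v :: rest =>
    if v < 0 then
      llsAltGo (rest.dropWhile (· < 0)) (max best (1 + ((rest.takeWhile (· < 0)).length : Int)))
    else
      llsAltGo rest best
termination_by vs.length
decreasing_by
  · simpa using Nat.lt_succ_of_le (List.length_dropWhile_le _ _)
  · simp

def longest_losing_streak_alt (values : List Int) : Int := llsAltGo values 0

-- ===== PRECONDITION & SPEC =====
def Spec_longest_losing_streak (values : List Int) (out : Int) : Prop := out = longest_losing_streak_alt values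
instance (values : List Int) (out : Int) : Decidable (Spec_longest_losing_streak values out) := by unfold Spec_longest_losing_streak; infer_instance

-- ===== CLAIM (what is proved, stated in full; the proofs are below) =====
def Claim_equal_longest_losing_streak : Prop := ∀ (values : List Int), Dom_longest_losing_streak values → Spec_longest_losing_streak values (longest_losing_streak values)

-- ===== LEMMAS AND PROOFS =====

-- ===== VERDICT (by name: the statement is the Claim_ definition above) =====
-- A's fold consumes an all-negative block in one go
theorem foldA_run (run rest : List Int) (hrun : ∀ v ∈ run, v < 0) (l c : Int) (hcl : c ≤ l) :
    (run ++ rest).foldl (fun (s : Int × Int) v =>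
      if v < 0 then (max s.1 (s.2 + 1), s.2 + 1) else (s.1, 0)) (l, c)
    = rest.foldl (fun (s : Int × Int) v =>
      if v < 0 then (max s.1 (s.2 + 1), s.2 + 1) else (s.1, 0))
        (max l (c + (run.length : Int)), c + (run.length : Int)) := by
  induction run generalizing l c with
  | nil => simp [max_eq_left hcl]
  | cons v run ih =>
    have hv : v < 0 := hrun v (by simp)
    simp only [List.cons_append, List.foldl_cons, if_pos hv]
    rw [ih (fun w hw => hrun w (by simp [hw])) _ _ (le_max_right _ _)]
    have h1 : (max (max l (c + 1)) (c + 1 + (run.length : Int)), c + 1 + (run.length : Int))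
        = (max l (c + ((v :: run).length : Int)), c + ((v :: run).length : Int)) := by
      simp only [List.length_cons]
      push_cast
      refine Prod.ext ?_ ?_
      · simp only [max_def]; split_ifs <;> omega
      · omega
    rw [h1]

theorem foldA_eq_altGo (vs : List Int) (l : Int) (hl : 0 ≤ l) :
    (vs.foldl (fun (s : Int × Int) v =>
      if v < 0 then (max s.1 (s.2 + 1), s.2 + 1) else (s.1, 0)) (l, 0)).1
    = llsAltGo vs l := by
  induction hn : vs.length using Nat.strong_induction_on generalizing vs l with
  | _ n ih =>
  match vs with
  | [] => simp [llsAltGo]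
  | v :: rest =>
    by_cases hv : v < 0
    · have hsplit : v :: rest
        = (v :: rest).takeWhile (· < 0) ++ (v :: rest).dropWhile (· < 0) :=
        (List.takeWhile_append_dropWhile).symm
      have hmem : ∀ w ∈ (v :: rest).takeWhile (· < 0), w < 0 := by
        intro w hw
        simpa using List.mem_takeWhile_imp hw
      rw [hsplit, foldA_run _ _ hmem l 0 hl]
      have htk : (v :: rest).takeWhile (· < 0) = v :: rest.takeWhile (· < 0) := by
        simp [hv]
      have hdp : (v :: rest).dropWhile (· < 0) = rest.dropWhile (· < 0) := by
        simp [hv]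
      rw [htk, hdp]
      rw [List.cons_append, List.takeWhile_append_dropWhile]
      have haltn : llsAltGo (v :: rest) l
          = llsAltGo (rest.dropWhile (· < 0)) (max l (1 + ((rest.takeWhile (· < 0)).length : Int))) := by
        rw [llsAltGo]; simp [hv]
      rw [haltn]
      set d := rest.dropWhile (· < 0) with hd
      match hdd : d with
      | [] =>
        simp [llsAltGo, List.length_cons]
        ring_nf
      | w :: d' =>
        have hw : ¬ (w < 0) := by
          have h := List.head?_dropWhile_not (fun x => decide (x < 0)) rest
          rw [← hd] at h
          simpa using h
        rw [llsAltGo]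
        simp only [List.foldl_cons, if_neg hw, List.length_cons]
        have hcast : (0 : Int) + (((rest.takeWhile (· < 0)).length + 1 : Nat) : Int)
            = 1 + ((rest.takeWhile (· < 0)).length : Int) := by push_cast; omega
        rw [hcast]
        have hn' : rest.length + 1 = n := by simpa using hn
        have hlen : d'.length < n := by
          have h1 : (rest.dropWhile (· < 0)).length ≤ rest.length := List.length_dropWhile_le _ _
          rw [← hd] at h1
          simp at h1
          omega
        exact ih d'.length hlen d' _ (le_trans hl (le_max_left _ _)) rfl
    · simp only [List.foldl_cons, if_neg hv]
      rw [llsAltGo]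
      rw [if_neg hv]
      exact ih rest.length (by simp [← hn]) rest l hl rfl

theorem longest_losing_streak_spec : Claim_equal_longest_losing_streak := by
  intro values _
  unfold Spec_longest_losing_streak longest_losing_streak longest_losing_streak_alt
  exact foldA_eq_altGo values 0 le_rfl
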